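-- pv_equiv track=rewrite | github.com/sw561/AdventOfCode | 2015/2015_13.py | table_permutations
-- ===== SOURCE A (Python) =====
-- from itertools import permutations
--
-- def table_permutations(x):
-- 	# Symmetry of circular table means mirror images are the same, and
-- 	# rotations are the same.
-- 	#
-- 	# x is list of distinct elements.
--
-- 	# This means we can choose an arbitrary element of x and place it first.
-- 	# We can then eliminate mirror images reflected around x by placing the
-- 	# restriction that the element to the left of x, is larger than the elment
-- 	# to the right of x. By larger we can mean anything, so just use relative
-- 	# positions in the list x.
--
-- 	u = [None]*3
-- 	u[1] = x[0]
-- 	for second_index in range(1, len(x)):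
-- 		u[0] = x[second_index]
-- 		for third_index in range(second_index+1, len(x)):
-- 			u[2] = x[third_index]
-- 			for p in permutations(x[i] for i in\
-- 					range(1, len(x)) if i not in [second_index, third_index]):
-- 				yield u + list(p)
-- ===== SOURCE B (Python) =====
-- from itertools import permutations
--
-- def table_permutations(x):
-- 	# Single pass over permutations of the remaining INDICES: pin x[0] in the
-- 	# middle seat, and kill mirror images by keeping only index tuples whose
-- 	# first entry is smaller than their second. itertools' lexicographic order
-- 	# varies p[0] slowest, then p[1], then the tail, which reproduces A's
-- 	# second_index / third_index / tail nesting order exactly.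
-- 	first = x[0]
-- 	for p in permutations(range(1, len(x))):
-- 		if len(p) >= 2 and p[0] < p[1]:
-- 			yield [x[p[0]], first, x[p[1]]] + [x[i] for i in p[2:]]
-- ===== Notes on version B (the rewrite author's own statement) =====
-- stated objective: alternative
-- what changed: A's three nested loops (second seat, third seat, permutations of the leftover elements) are replaced by one pass over itertools.permutations of the index range 1..n-1, keeping only tuples whose first index is smaller than their second; itertools' lexicographic order makes the emission order identical.
import Mathlib
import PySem

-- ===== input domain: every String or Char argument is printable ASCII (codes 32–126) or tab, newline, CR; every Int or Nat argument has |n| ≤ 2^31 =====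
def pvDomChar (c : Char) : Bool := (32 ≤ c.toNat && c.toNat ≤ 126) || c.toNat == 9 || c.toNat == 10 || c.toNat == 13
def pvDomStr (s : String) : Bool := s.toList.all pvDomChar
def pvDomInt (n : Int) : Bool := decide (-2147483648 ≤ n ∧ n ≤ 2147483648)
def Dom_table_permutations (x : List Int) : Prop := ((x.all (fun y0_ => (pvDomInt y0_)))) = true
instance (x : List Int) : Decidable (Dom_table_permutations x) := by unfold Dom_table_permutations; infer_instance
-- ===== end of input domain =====

-- Both Pythons are generators; the ports model the full yielded sequence as a list (return value only, no mutation).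
-- B replaces A's three nested loops by one filtered pass over permutations of the index range (alternative decomposition, same cost).

-- ===== PORT A =====
-- A, literally: u[1] = x[0]; for second_index, for third_index, for p in permutations(remaining elements): yield u + list(p).
def table_permutations (x : List Int) : List (List Int) :=
  let u1 := PySem.List.pyGetD x 0 0
  (PySem.List.pyRange 1 (x.length : Int) 1).flatMap (fun second_index =>
    (PySem.List.pyRange (second_index + 1) (x.length : Int) 1).flatMap (fun third_index =>
      let rem := ((PySem.List.pyRange 1 (x.length : Int) 1).filter
                    (fun i => !(i == second_index || i == third_index))).map (fun i => PySem.List.pyGetD x i 0)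
      (PySem.List.permutations rem rem.length).map (fun p =>
        PySem.List.pyGetD x second_index 0 :: u1 :: PySem.List.pyGetD x third_index 0 :: p)))

-- ===== PORT B =====
-- B, literally: first = x[0]; for p in permutations(range(1, len(x))): keep len(p) >= 2 and p[0] < p[1].
def table_permutations_alt (x : List Int) : List (List Int) :=
  let first := PySem.List.pyGetD x 0 0
  let idx := PySem.List.pyRange 1 (x.length : Int) 1
  (PySem.List.permutations idx idx.length).filterMap (fun p =>
    match p with
    | a :: b :: rest =>
        if a < b then
          some (PySem.List.pyGetD x a 0 :: first :: PySem.List.pyGetD x b 0 ::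
                rest.map (fun i => PySem.List.pyGetD x i 0))
        else none
    | _ => none)

-- ===== PRECONDITION & SPEC =====
-- Pre_ excludes only the empty list, on which Python A (and B) raises IndexError at the first element access.
def Pre_table_permutations (x : List Int) : Prop := x ≠ []
instance (x : List Int) : Decidable (Pre_table_permutations x) := by unfold Pre_table_permutations; infer_instance
def pvWitness_table_permutations : List Int := ([1, 2, 3, 4])

def Spec_table_permutations (x : List Int) (out : List (List Int)) : Prop := out = table_permutations_alt x
instance (x : List Int) (out : List (List Int)) : Decidable (Spec_table_permutations x out) := by unfold Spec_table_permutations; infer_instance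

-- ===== CLAIM (what is proved, stated in full; the proofs are below) =====
def Claim_equal_table_permutations : Prop := ∀ (x : List Int), Dom_table_permutations x → Pre_table_permutations x → Spec_table_permutations x (table_permutations x)

-- ===== LEMMAS AND PROOFS =====

-- itertools.permutations of the whole list, one level unfolded (the `none` branch is unreachable but kept from the definition).
lemma perms_succ (l : List Int) (hl : l ≠ []) :
    PySem.List.permutations l l.length
      = (List.range l.length).flatMap (fun i =>
          l[i]?.elim [] (fun a => (PySem.List.permutations (l.eraseIdx i) (l.eraseIdx i).length).map (a :: ·))) := by
  obtain ⟨m, hm⟩ : ∃ m, l.length = m + 1 := ⟨l.length - 1, by cases l <;> simp_all⟩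
  rw [hm]
  show (List.range l.length).flatMap _ = _
  rw [hm]
  apply List.flatMap_congr
  intro i hi
  rw [List.mem_range, ← hm] at hi
  rw [List.getElem?_eq_getElem hi]
  have he : (l.eraseIdx i).length = m := by rw [List.length_eraseIdx_of_lt hi, hm]; rfl
  simp only [he, Option.elim]

-- permutations commutes with map.
lemma perms_map (r : Nat) (l : List Int) (f : Int → Int) :
    PySem.List.permutations (l.map f) r = (PySem.List.permutations l r).map (List.map f) := by
  induction r generalizing l with
  | zero => rfl
  | succ r ih =>
    show (List.range (l.map f).length).flatMap _ = ((List.range l.length).flatMap _).map _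
    rw [List.length_map, List.map_flatMap]
    apply List.flatMap_congr
    intro i hi
    rw [List.getElem?_map]
    cases h : l[i]? with
    | none => simp
    | some a =>
      simp only [Option.map_some]
      rw [List.eraseIdx_map, ih, List.map_map, List.map_map]
      rfl

-- a flatMap over the index range of a duplicate-free list is a flatMap over its elements,
-- with the erased list rewritten as a filter.
lemma rangeElim {β : Type} : ∀ (l : List Int), l.Nodup → ∀ (g : Int → List Int → List β),
    (List.range l.length).flatMap (fun i => l[i]?.elim [] (fun a => g a (l.eraseIdx i)))
      = l.flatMap (fun a => g a (l.filter (fun t => !(t == a)))) := by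
  intro l
  induction l with
  | nil => intro _ g; rfl
  | cons a t ih =>
    intro hnd g
    have hat : a ∉ t := by simp [List.nodup_cons] at hnd; exact hnd.1
    have hnt : t.Nodup := by simp [List.nodup_cons] at hnd; exact hnd.2
    show (List.range (t.length + 1)).flatMap _ = _
    rw [List.range_succ_eq_map, List.flatMap_cons, List.flatMap_map]
    have h1 : (fun i => ((a :: t)[i + 1]?).elim ([] : List β) (fun b => g b ((a :: t).eraseIdx (i + 1))))
            = (fun i => (t[i]?).elim ([] : List β) (fun b => (fun b' r => g b' (a :: r)) b (t.eraseIdx i))) := by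
      funext i
      rfl
    rw [h1, ih hnt (fun b r => g b (a :: r))]
    have h2 : (a :: t).filter (fun t' => !(t' == a)) = t := by
      rw [List.filter_cons]
      simp only [beq_self_eq_true, Bool.not_true]
      exact List.filter_eq_self.mpr (fun b hb => by
        have hba : b ≠ a := fun h => hat (h ▸ hb)
        simp [hba])
    rw [List.flatMap_cons, h2]
    congr 1
    apply List.flatMap_congr
    intro b hb
    have hab : a ≠ b := fun h => hat (h ▸ hb)
    have h3 : (a :: t).filter (fun t' => !(t' == b)) = a :: t.filter (fun t' => !(t' == b)) := by
      rw [List.filter_cons, if_pos]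
      simp [hab]
    rw [h3]

lemma flatMap_ite {β : Type} (m : List Int) (p : Int → Prop) [DecidablePred p] (g : Int → List β) :
    m.flatMap (fun b => if p b then g b else []) = (m.filter (fun b => decide (p b))).flatMap g := by
  induction m with
  | nil => rfl
  | cons a t ih =>
    rw [List.flatMap_cons, List.filter_cons, ih]
    by_cases h : p a
    · simp [h]
    · simp [h]

-- the second seat: one level of B's filtered permutation pass equals A's third_index loop.
lemma inner_lemma (f : Int → Int) (c a : Int) : ∀ (r : List Int), r.Nodup →
    (PySem.List.permutations r r.length).filterMap (fun q =>
        match q with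
        | b :: rest => if a < b then some (f a :: c :: f b :: rest.map f) else none
        | [] => none)
      = (r.filter (fun b => decide (a < b))).flatMap (fun b =>
          (PySem.List.permutations (r.filter (fun t => !(t == b)))
              (r.filter (fun t => !(t == b))).length).map
            (fun q => f a :: c :: f b :: q.map f)) := by
  intro r hnd
  by_cases hr : r = []
  · subst hr; rfl
  · rw [perms_succ r hr, List.filterMap_flatMap]
    have step : ∀ i ∈ List.range r.length,
        ((r[i]?.elim [] (fun b => (PySem.List.permutations (r.eraseIdx i) (r.eraseIdx i).length).map (b :: ·))).filterMap
            (fun q => match q with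
              | b :: rest => if a < b then some (f a :: c :: f b :: rest.map f) else none
              | [] => none))
        = (r[i]?.elim ([] : List (List Int)) (fun b => (fun b' rr => if a < b' then
                (PySem.List.permutations rr rr.length).map (fun q => f a :: c :: f b' :: q.map f)
              else []) b (r.eraseIdx i))) := by
      intro i hi
      cases h : r[i]? with
      | none => rfl
      | some b =>
        simp only [Option.elim]
        rw [List.filterMap_map]
        by_cases hab : a < b
        · simp only [Function.comp_def, hab, if_pos]
          simp
        · simp only [Function.comp_def, hab, if_false]
          simp
    rw [List.flatMap_congr step,
        rangeElim r hnd (fun b rr => if a < b then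
          (PySem.List.permutations rr rr.length).map (fun q => f a :: c :: f b :: q.map f) else []),
        flatMap_ite]

-- the heart: B's filtered pass over permutations of a duplicate-free list l equals A's nested loops over l.
lemma main_lemma (f : Int → Int) (c : Int) : ∀ (l : List Int), l.Nodup →
    (PySem.List.permutations l l.length).filterMap (fun p =>
        match p with
        | a :: b :: rest => if a < b then some (f a :: c :: f b :: rest.map f) else none
        | _ => none)
      = l.flatMap (fun a => (l.filter (fun b => decide (a < b))).flatMap (fun b =>
          (PySem.List.permutations ((l.filter (fun t => !(t == a))).filter (fun t => !(t == b)))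
              ((l.filter (fun t => !(t == a))).filter (fun t => !(t == b))).length).map
            (fun q => f a :: c :: f b :: q.map f))) := by
  intro l hnd
  by_cases hl : l = []
  · subst hl; rfl
  · rw [perms_succ l hl, List.filterMap_flatMap]
    have step : ∀ i ∈ List.range l.length,
        ((l[i]?.elim [] (fun a => (PySem.List.permutations (l.eraseIdx i) (l.eraseIdx i).length).map (a :: ·))).filterMap
            (fun p => match p with
              | a :: b :: rest => if a < b then some (f a :: c :: f b :: rest.map f) else none
              | _ => none))
        = (l[i]?.elim ([] : List (List Int)) (fun a => (fun a' r =>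
            (PySem.List.permutations r r.length).filterMap (fun q =>
              match q with
              | b :: rest => if a' < b then some (f a' :: c :: f b :: rest.map f) else none
              | [] => none)) a (l.eraseIdx i))) := by
      intro i hi
      cases h : l[i]? with
      | none => rfl
      | some a =>
        simp only [Option.elim]
        rw [List.filterMap_map]
        apply List.filterMap_congr
        intro q _
        cases q <;> rfl
    rw [List.flatMap_congr step,
        rangeElim l hnd (fun a r =>
          (PySem.List.permutations r r.length).filterMap (fun q =>
            match q with
            | b :: rest => if a < b then some (f a :: c :: f b :: rest.map f) else none
            | [] => none))]
    apply List.flatMap_congr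
    intro a ha
    rw [inner_lemma f c a _ (hnd.filter _)]
    have hfil : (l.filter (fun t => !(t == a))).filter (fun b => decide (a < b))
        = l.filter (fun b => decide (a < b)) := by
      rw [List.filter_filter]
      have he : (fun b => decide (a < b) && !(b == a)) = (fun b => decide (a < b)) := by
        funext b
        by_cases h : a < b
        · have hba : ¬ (b = a) := by omega
          simp [h, hba]
        · simp [h]
      rw [he]
    rw [hfil]

-- range(si+1, n) is the tail of range(1, n) above si.
lemma pyRange_tail (n si : Int) (h1 : 1 ≤ si) :
    PySem.List.pyRange (si + 1) n 1
      = (PySem.List.pyRange 1 n 1).filter (fun b => decide (si < b)) := by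
  by_cases h : n ≤ si
  · rw [PySem.List.pyRange_one_eq_nil (by omega)]
    symm
    rw [List.filter_eq_nil_iff]
    intro b hb
    rw [PySem.List.mem_pyRange_one] at hb
    simp only [decide_eq_true_eq]
    omega
  · rw [PySem.List.pyRange_one_append 1 (si + 1) n (by omega) (by omega), List.filter_append]
    have e1 : (PySem.List.pyRange 1 (si + 1) 1).filter (fun b => decide (si < b)) = [] := by
      rw [List.filter_eq_nil_iff]
      intro b hb
      rw [PySem.List.mem_pyRange_one] at hb
      simp only [decide_eq_true_eq]
      omega
    have e2 : (PySem.List.pyRange (si + 1) n 1).filter (fun b => decide (si < b))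
        = PySem.List.pyRange (si + 1) n 1 := by
      rw [List.filter_eq_self]
      intro b hb
      rw [PySem.List.mem_pyRange_one] at hb
      simp only [decide_eq_true_eq]
      omega
    rw [e1, e2, List.nil_append]

-- ===== VERDICT (by name: the statement is the Claim_ definition above) =====
theorem table_permutations_spec : Claim_equal_table_permutations := by
  intro x _ _
  unfold Spec_table_permutations
  have hnd := PySem.List.nodup_pyRange_one 1 (x.length : Int)
  have hB : table_permutations_alt x
      = (PySem.List.pyRange 1 (x.length : Int) 1).flatMap (fun a =>
          ((PySem.List.pyRange 1 (x.length : Int) 1).filter (fun b => decide (a < b))).flatMap (fun b =>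
            (PySem.List.permutations
                (((PySem.List.pyRange 1 (x.length : Int) 1).filter (fun t => !(t == a))).filter (fun t => !(t == b)))
                (((PySem.List.pyRange 1 (x.length : Int) 1).filter (fun t => !(t == a))).filter (fun t => !(t == b))).length).map
              (fun q => PySem.List.pyGetD x a 0 :: PySem.List.pyGetD x 0 0 :: PySem.List.pyGetD x b 0 ::
                q.map (fun i => PySem.List.pyGetD x i 0)))) :=
    main_lemma (fun i => PySem.List.pyGetD x i 0) (PySem.List.pyGetD x 0 0) _ hnd
  have hA : table_permutations x
      = (PySem.List.pyRange 1 (x.length : Int) 1).flatMap (fun a =>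
          ((PySem.List.pyRange 1 (x.length : Int) 1).filter (fun b => decide (a < b))).flatMap (fun b =>
            (PySem.List.permutations
                (((PySem.List.pyRange 1 (x.length : Int) 1).filter (fun t => !(t == a))).filter (fun t => !(t == b)))
                (((PySem.List.pyRange 1 (x.length : Int) 1).filter (fun t => !(t == a))).filter (fun t => !(t == b))).length).map
              (fun q => PySem.List.pyGetD x a 0 :: PySem.List.pyGetD x 0 0 :: PySem.List.pyGetD x b 0 ::
                q.map (fun i => PySem.List.pyGetD x i 0)))) := by
    show (PySem.List.pyRange 1 (x.length : Int) 1).flatMap _ = _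
    apply List.flatMap_congr
    intro si hsi
    have h1 : 1 ≤ si := (PySem.List.mem_pyRange_one.mp hsi).1
    rw [pyRange_tail (x.length : Int) si h1]
    apply List.flatMap_congr
    intro ti hti
    have hfil : (PySem.List.pyRange 1 (x.length : Int) 1).filter (fun i => !(i == si || i == ti))
        = ((PySem.List.pyRange 1 (x.length : Int) 1).filter (fun t => !(t == si))).filter (fun t => !(t == ti)) := by
      rw [List.filter_filter]
      have he : (fun t => !(t == ti) && !(t == si)) = (fun i : Int => !(i == si || i == ti)) := by
        funext t
        cases h1 : (t == si) <;> cases h2 : (t == ti) <;> simp_all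
      rw [he]
    have hrm : ∀ (fil : List Int),
        PySem.List.permutations (fil.map (fun i => PySem.List.pyGetD x i 0)) (fil.map (fun i => PySem.List.pyGetD x i 0)).length
          = (PySem.List.permutations fil fil.length).map (List.map (fun i => PySem.List.pyGetD x i 0)) := by
      intro fil
      rw [List.length_map]
      exact perms_map fil.length fil _
    show (PySem.List.permutations _ _).map _ = _
    rw [hrm, List.map_map, hfil]
    rfl
  rw [hA, hB]
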